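-- pv_equiv track=rewrite | github.com/nghiatt90/cs-practice | codelearn/charlocation.py | charLocation
-- ===== SOURCE A (Python) =====
-- def charLocation(tex, wid, ch):
--     ans = []
--     for i, c in enumerate(tex):
--         if c != ch:
--             continue
--         r = i // wid
--         c = i % wid
--         if r & 1:
--             c = wid - c - 1
--         ans.append([r, c])
--     return sorted(ans)
-- ===== SOURCE B (Python) =====
-- def charLocation(tex, wid, ch):
--     # Single pass over the text row by row: rows come out in increasing order and,
--     # after reversing the matches of odd (right-to-left) rows, columns are already
--     # sorted, so no final sort is needed.
--     ans = []
--     rows = (len(tex) + wid - 1) // wid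
--     for row in range(rows):
--         seg = tex[row * wid:(row + 1) * wid]
--         cols = [c for c, x in enumerate(seg) if x == ch]
--         if row & 1:
--             cols = [wid - c - 1 for c in reversed(cols)]
--         ans += [[row, c] for c in cols]
--     return ans
-- ===== Notes on version B (the rewrite author's own statement) =====
-- stated objective: alternative
-- what changed: B replaces A's collect-all-then-sort with a single row-by-row pass: each row's matches are found in text order and odd (right-to-left) rows are reversed and column-flipped, so the output is emitted already sorted and no final sort is needed.
-- outside the precondition, e.g. on charLocation('abc', -2, 'b'): A returns [[-1, -2]], B returns []; on charLocation('abc', 0, 'x'): A returns [], B raises ZeroDivisionError; on charLocation('abc', 0, 'b'): A raises ZeroDivisionError, B raises ZeroDivisionError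
import Mathlib
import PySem

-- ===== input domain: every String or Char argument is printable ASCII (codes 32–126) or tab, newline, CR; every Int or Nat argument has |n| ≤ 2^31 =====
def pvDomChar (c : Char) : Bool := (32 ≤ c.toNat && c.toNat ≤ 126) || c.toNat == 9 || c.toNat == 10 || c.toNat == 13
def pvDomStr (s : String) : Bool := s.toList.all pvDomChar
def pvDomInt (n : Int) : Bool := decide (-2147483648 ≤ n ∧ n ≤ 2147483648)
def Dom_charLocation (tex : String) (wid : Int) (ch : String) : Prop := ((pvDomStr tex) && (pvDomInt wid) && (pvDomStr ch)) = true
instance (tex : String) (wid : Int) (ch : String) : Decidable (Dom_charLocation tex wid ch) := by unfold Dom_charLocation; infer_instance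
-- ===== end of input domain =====

-- B replaces A's collect-then-sort with a single pass over the text row by row
-- (odd rows' matches reversed), so the result comes out already sorted — no final sort.

-- ===== PORT A =====
def charLocation (tex : String) (wid : Int) (ch : String) : List (List Int) :=
  let ans : List (List Int) :=
    (PySem.List.enumerate tex.toList 0).foldl (fun ans ic =>
      if String.mk [ic.2] ≠ ch then ans
      else
        let r := PySem.Int.floordiv ic.1 wid
        let c := PySem.Int.mod ic.1 wid
        -- Python's 'r & 1' on an int is exactly r mod 2 (floor mod)
        let c := if PySem.Int.mod r 2 == 1 then wid - c - 1 else c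
        ans ++ [[r, c]]) []
  PySem.List.sorted ans (fun x => x) false

-- ===== PORT B =====
def charLocation_alt (tex : String) (wid : Int) (ch : String) : List (List Int) :=
  let rows := PySem.Int.floordiv (PySem.Str.len tex + wid - 1) wid
  (PySem.List.pyRange 0 rows 1).foldl (fun ans row =>
    let seg := PySem.Str.slice tex (some (row * wid)) (some ((row + 1) * wid))
    let cols := ((PySem.List.enumerate seg.toList 0).filter (fun cx => String.mk [cx.2] == ch)).map (·.1)
    -- 'row & 1' is row mod 2
    let cols := if PySem.Int.mod row 2 == 1 then cols.reverse.map (fun c => wid - c - 1) else cols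
    ans ++ cols.map (fun c => [row, c])) []

-- ===== PRECONDITION & SPEC =====
-- Pre_ excludes wid ≤ 0 except when the character never occurs (then both return []):
-- a non-positive width is outside the natural domain of a text width — at wid = 0 A raises
-- ZeroDivisionError on the first match (B always raises there), and for wid < 0 with a match
-- A returns negative pseudo-coordinates while B naturally returns [].
def Pre_charLocation (tex : String) (wid : Int) (ch : String) : Prop :=
  0 < wid ∨ (wid ≠ 0 ∧ ch ∉ tex.toList.map (fun c => String.mk [c]))
instance (tex : String) (wid : Int) (ch : String) : Decidable (Pre_charLocation tex wid ch) := by unfold Pre_charLocation; infer_instance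

def pvWitness_charLocation : String × Int × String := ("abcbba", 2, "b")

def Spec_charLocation (tex : String) (wid : Int) (ch : String) (out : List (List Int)) : Prop := out = charLocation_alt tex wid ch
instance (tex : String) (wid : Int) (ch : String) (out : List (List Int)) : Decidable (Spec_charLocation tex wid ch out) := by unfold Spec_charLocation; infer_instance

-- ===== CLAIM (what is proved, stated in full; the proofs are below) =====
def Claim_equal_charLocation : Prop := ∀ (tex : String) (wid : Int) (ch : String), Dom_charLocation tex wid ch → Pre_charLocation tex wid ch → Spec_charLocation tex wid ch (charLocation tex wid ch)

-- ===== LEMMAS AND PROOFS =====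

-- the [row, col] entry A builds for absolute index i
def aEntry (wid : Int) (i : Int) : List Int :=
  [PySem.Int.floordiv i wid,
   if PySem.Int.mod (PySem.Int.floordiv i wid) 2 == 1
   then wid - PySem.Int.mod i wid - 1 else PySem.Int.mod i wid]

-- the block B emits for one row, given that row's segment of the text
def blk (wid : Int) (ch : String) (seg : List Char) (row : Int) : List (List Int) :=
  let cols := ((PySem.List.enumerate seg 0).filter (fun cx => String.mk [cx.2] == ch)).map (·.1)
  let cols := if PySem.Int.mod row 2 == 1 then cols.reverse.map (fun c => wid - c - 1) else cols
  cols.map (fun c => [row, c])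

-- B's whole output, structurally: k rows, peeling wid characters per row
def snakeRows (wid : Int) (ch : String) : Nat → List Char → Int → List (List Int)
  | 0, _, _ => []
  | k + 1, L, row => blk wid ch (L.take wid.toNat) row ++ snakeRows wid ch k (L.drop wid.toNat) (row + 1)

lemma foldA (wid : Int) (ch : String) (l : List (Int × Char)) (acc : List (List Int)) :
    l.foldl (fun ans ic => if String.mk [ic.2] ≠ ch then ans else ans ++ [aEntry wid ic.1]) acc
      = acc ++ (l.filter (fun ic => String.mk [ic.2] == ch)).map fun ic => aEntry wid ic.1 := by
  induction l generalizing acc with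
  | nil => simp
  | cons x xs ih =>
    rw [List.foldl_cons]
    by_cases h : String.mk [x.2] = ch
    · rw [if_neg (fun hn => hn h), ih, List.filter_cons, if_pos (by simp [h])]
      simp
    · rw [if_pos h, ih, List.filter_cons, if_neg (by simp [h])]

lemma A_eq (tex : String) (wid : Int) (ch : String) :
    charLocation tex wid ch
      = PySem.List.sorted
          (((PySem.List.enumerate tex.toList 0).filter (fun ic => String.mk [ic.2] == ch)).map
            fun ic => aEntry wid ic.1) (fun x => x) false := by
  unfold charLocation
  rw [show (fun (ans : List (List Int)) (ic : Int × Char) =>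
        if String.mk [ic.2] ≠ ch then ans
        else
          let r := PySem.Int.floordiv ic.1 wid
          let c := PySem.Int.mod ic.1 wid
          let c := if PySem.Int.mod r 2 == 1 then wid - c - 1 else c
          ans ++ [[r, c]])
      = fun ans ic => if String.mk [ic.2] ≠ ch then ans else ans ++ [aEntry wid ic.1] from rfl]
  rw [foldA]
  rfl

lemma enumerate_shift {α : Type} (xs : List α) (s : Int) :
    PySem.List.enumerate xs s = (PySem.List.enumerate xs 0).map fun p => (p.1 + s, p.2) := by
  induction xs generalizing s with
  | nil => simp [PySem.List.enumerate_nil]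
  | cons x xs ih =>
    rw [PySem.List.enumerate_cons, PySem.List.enumerate_cons, ih (s + 1), ih (0 + 1)]
    simp only [List.map_cons, List.map_map, Function.comp_def]
    refine List.cons_eq_cons.mpr ⟨by simp, List.map_congr_left fun p _ => ?_⟩
    simp only [Prod.mk.injEq, and_true]
    omega

lemma cols_pairwise (ch : String) (seg : List Char) :
    (((PySem.List.enumerate seg 0).filter (fun cx => String.mk [cx.2] == ch)).map (·.1)).Pairwise (· < ·) := by
  apply List.Pairwise.map
  · intro a b h; exact h
  · exact (PySem.List.pairwise_lt_enumerate seg 0).filter _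

lemma lt_cons_row (r c1 c2 : Int) (h : c1 < c2) : ([r, c1] : List Int) < [r, c2] :=
  List.Lex.cons (List.Lex.rel h)

lemma lt_cons_rows (r1 r2 c1 c2 : Int) (h : r1 < r2) : ([r1, c1] : List Int) < [r2, c2] :=
  List.Lex.rel h

lemma blk_mem (wid : Int) (ch : String) (seg : List Char) (row : Int) (x : List Int)
    (hx : x ∈ blk wid ch seg row) : ∃ c, x = [row, c] := by
  unfold blk at hx
  split at hx <;> simp at hx <;> obtain ⟨c, -, hc⟩ := hx <;> exact ⟨_, hc.symm⟩

lemma blk_nil (wid : Int) (ch : String) (row : Int) : blk wid ch [] row = [] := by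
  unfold blk
  simp [PySem.List.enumerate_nil]

lemma blk_pairwise (wid : Int) (ch : String) (seg : List Char) (row : Int) :
    (blk wid ch seg row).Pairwise (· < ·) := by
  unfold blk
  have hp := cols_pairwise ch seg
  split
  · rw [List.pairwise_map, List.pairwise_map, List.pairwise_reverse]
    exact hp.imp fun {a b} h => lt_cons_row row _ _ (by omega)
  · rw [List.pairwise_map]
    exact hp.imp fun {a b} h => lt_cons_row row _ _ h

lemma blk_perm (wid : Int) (hw : 0 < wid) (ch : String) (seg : List Char)
    (hseg : seg.length ≤ wid.toNat) (row : Int) (hrow : 0 ≤ row) :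
    (blk wid ch seg row).Perm
      (((PySem.List.enumerate seg (row * wid)).filter (fun ic => String.mk [ic.2] == ch)).map
        fun ic => aEntry wid ic.1) := by
  rw [enumerate_shift seg (row * wid)]
  rw [List.filter_map, List.map_map]
  simp only [Function.comp_def]
  have hcong :
      ((PySem.List.enumerate seg 0).filter (fun cx => String.mk [cx.2] == ch)).map
          (fun p : Int × Char => aEntry wid (p.1 + row * wid))
      = ((PySem.List.enumerate seg 0).filter (fun cx => String.mk [cx.2] == ch)).map
          (fun ic => [row, if PySem.Int.mod row 2 == 1 then wid - ic.1 - 1 else ic.1]) := by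
    apply List.map_congr_left
    intro ic hic
    have hmem := List.mem_of_mem_filter hic
    rw [PySem.List.mem_enumerate_iff] at hmem
    obtain ⟨k, hk, hic2⟩ := hmem
    have h1 : (0 : Int) ≤ ic.1 := by rw [hic2]; simp
    have h2 : ic.1 < wid := by
      rw [hic2]; simp
      have hk' : (k : Int) < seg.length := by exact_mod_cast hk
      have : (seg.length : Int) ≤ wid := by omega
      omega
    unfold aEntry
    have hd : PySem.Int.floordiv (ic.1 + row * wid) wid = row := by
      rw [PySem.Int.floordiv_eq_ediv_of_pos hw,
        Int.add_mul_ediv_right _ _ (by omega : wid ≠ 0),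
        Int.ediv_eq_zero_of_lt h1 h2]
      omega
    have hm : PySem.Int.mod (ic.1 + row * wid) wid = ic.1 := by
      rw [PySem.Int.mod_eq_emod_of_pos hw, Int.add_mul_emod_self_right,
        Int.emod_eq_of_lt h1 h2]
    rw [hd, hm]
  rw [hcong]
  unfold blk
  by_cases hpar : (PySem.Int.mod row 2 == 1) = true
  · simp only [hpar, if_true, List.map_map, List.map_reverse]
    exact List.reverse_perm _
  · rw [Bool.not_eq_true] at hpar
    simp only [hpar, Bool.false_eq_true, if_false, List.map_map]
    exact List.Perm.refl _

lemma snake_nil (wid : Int) (ch : String) (k : Nat) (row : Int) :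
    snakeRows wid ch k [] row = [] := by
  induction k generalizing row with
  | zero => rfl
  | succ k ih => rw [snakeRows]; simp [blk_nil, ih]

lemma snake_mem (wid : Int) (ch : String) (k : Nat) (L : List Char) (row : Int) (x : List Int)
    (hx : x ∈ snakeRows wid ch k L row) : ∃ r c, x = [r, c] ∧ row ≤ r := by
  induction k generalizing L row with
  | zero => simp [snakeRows] at hx
  | succ k ih =>
    rw [snakeRows, List.mem_append] at hx
    rcases hx with hx | hx
    · obtain ⟨c, hc⟩ := blk_mem _ _ _ _ _ hx; exact ⟨row, c, hc, le_refl _⟩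
    · obtain ⟨r, c, h1, h2⟩ := ih _ _ hx; exact ⟨r, c, h1, by omega⟩

lemma snake_pairwise (wid : Int) (ch : String) (k : Nat) (L : List Char) (row : Int) :
    (snakeRows wid ch k L row).Pairwise (· < ·) := by
  induction k generalizing L row with
  | zero => simp [snakeRows]
  | succ k ih =>
    rw [snakeRows, List.pairwise_append]
    refine ⟨blk_pairwise _ _ _ _, ih _ _, ?_⟩
    intro x hx y hy
    obtain ⟨c, hc⟩ := blk_mem _ _ _ _ _ hx
    obtain ⟨r, c', hc', hr⟩ := snake_mem _ _ _ _ _ _ hy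
    rw [hc, hc']
    exact lt_cons_rows _ _ _ _ (by omega)

lemma snake_perm (wid : Int) (hw : 0 < wid) (ch : String) (k : Nat) (L : List Char) (row : Int)
    (hrow : 0 ≤ row) (hlen : L.length ≤ k * wid.toNat) :
    (snakeRows wid ch k L row).Perm
      (((PySem.List.enumerate L (row * wid)).filter (fun ic => String.mk [ic.2] == ch)).map
        fun ic => aEntry wid ic.1) := by
  induction k generalizing L row with
  | zero =>
    have : L = [] := by
      cases L with
      | nil => rfl
      | cons a l => simp at hlen
    subst this
    simp [snakeRows, PySem.List.enumerate_nil]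
  | succ k ih =>
    have hsplit : L = L.take wid.toNat ++ L.drop wid.toNat := (List.take_append_drop _ _).symm
    rw [snakeRows]
    conv_rhs => rw [hsplit]
    rw [PySem.List.enumerate_append, List.filter_append, List.map_append]
    apply List.Perm.append
    · exact blk_perm wid hw ch _ (by simp) row hrow
    · by_cases hlle : L.length ≤ wid.toNat
      · have hd : L.drop wid.toNat = [] := by simp; omega
        rw [hd, snake_nil]
        simp [PySem.List.enumerate_nil]
      · have hlen2 : (L.take wid.toNat).length = wid.toNat := by simp; omega
        rw [hlen2]
        have hco : row * wid + (wid.toNat : Int) = (row + 1) * wid := by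
          have hcast : (wid.toNat : Int) = wid := by omega
          rw [hcast]; ring
        rw [hco]
        have hlen' : L.length ≤ k * wid.toNat + wid.toNat := by
          have := hlen; rw [Nat.succ_mul] at this; exact this
        exact ih _ (row + 1) (by omega) (by simp only [List.length_drop]; omega)

lemma flat_eq_snake (wid : Int) (ch : String) (k : Nat) (L : List Char) (r0 : Int) :
    ((List.range k).flatMap fun t =>
        blk wid ch ((L.drop (t * wid.toNat)).take wid.toNat) (r0 + (t : Int)))
      = snakeRows wid ch k L r0 := by
  induction k generalizing L r0 with
  | zero => simp [snakeRows]
  | succ k ih =>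
    rw [List.range_succ_eq_map, List.flatMap_cons, List.flatMap_map, snakeRows]
    congr 1
    · simp
    · rw [← ih (L.drop wid.toNat) (r0 + 1)]
      congr 1
      funext t
      have h1 : (L.drop wid.toNat).drop (t * wid.toNat) = L.drop (Nat.succ t * wid.toNat) := by
        rw [List.drop_drop]
        congr 1
        rw [Nat.succ_mul]
        ring
      have h2 : (r0 + 1) + (t : Int) = r0 + ((Nat.succ t : Nat) : Int) := by push_cast; ring
      rw [h1, h2]

-- B's port equals snakeRows
lemma B_eq (tex : String) (wid : Int) (hw : 0 < wid) (ch : String) :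
    charLocation_alt tex wid ch
      = snakeRows wid ch
          (PySem.Int.floordiv ((tex.toList.length : Int) + wid - 1) wid).toNat tex.toList 0 := by
  have hcast : (wid.toNat : Int) = wid := by omega
  show (PySem.List.pyRange 0 (PySem.Int.floordiv (PySem.Str.len tex + wid - 1) wid)).foldl
      (fun ans row => ans ++ (if PySem.Int.mod row 2 == 1
          then ((((PySem.List.enumerate
                    (PySem.Str.slice tex (some (row * wid)) (some ((row + 1) * wid))).toList 0).filter
                  (fun cx => String.mk [cx.2] == ch)).map (·.1)).reverse).map (fun c => wid - c - 1)
          else (((PySem.List.enumerate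
                    (PySem.Str.slice tex (some (row * wid)) (some ((row + 1) * wid))).toList 0).filter
                  (fun cx => String.mk [cx.2] == ch)).map (·.1))).map (fun c => [row, c])) []
    = snakeRows wid ch (PySem.Int.floordiv ((tex.toList.length : Int) + wid - 1) wid).toNat tex.toList 0
  rw [PySem.Str.len_eq]
  conv_lhs => rw [show PySem.Int.floordiv ((tex.toList.length : Int) + wid - 1) wid
      = (((PySem.Int.floordiv ((tex.toList.length : Int) + wid - 1) wid).toNat : Nat) : Int)
    from by
      have hR0 : 0 ≤ PySem.Int.floordiv ((tex.toList.length : Int) + wid - 1) wid := by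
        rw [PySem.Int.floordiv_eq_ediv_of_pos hw]
        apply Int.ediv_nonneg <;> omega
      omega]
  rw [PySem.List.pyRange_zero_natCast, List.foldl_map]
  rw [PySem.List.foldl_append_eq_flatMap]
  rw [List.nil_append]
  rw [← flat_eq_snake wid ch _ tex.toList 0]
  congr 1
  funext t
  show blk wid ch
      (PySem.Str.slice tex (some ((t : Int) * wid)) (some (((t : Int) + 1) * wid))).toList ((t : Int))
    = blk wid ch ((tex.toList.drop (t * wid.toNat)).take wid.toNat) ((0 : Int) + (t : Int))
  have e1 : ((t : Int) * wid).toNat = t * wid.toNat := by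
    conv_lhs => rw [← hcast, ← Nat.cast_mul]
    rw [Int.toNat_natCast]
  have e2 : (((t : Int) + 1) * wid).toNat = (t + 1) * wid.toNat := by
    conv_lhs => rw [← hcast,
      show ((t : Int) + 1) = ((t + 1 : Nat) : Int) from by push_cast; ring, ← Nat.cast_mul]
    rw [Int.toNat_natCast]
  have hseg : (PySem.Str.slice tex (some ((t : Int) * wid)) (some (((t : Int) + 1) * wid))).toList
      = (tex.toList.drop (t * wid.toNat)).take wid.toNat := by
    rw [PySem.Str.toList_slice, PySem.Chars.slice_eq_listSlice,
      PySem.List.slice_toNat _ (by positivity) (by positivity), e1, e2]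
    congr 1
    rw [Nat.succ_mul]
    omega
  rw [hseg, zero_add]

-- the port's `sorted` picks the core `LT (List Int)` instance; PySem's sorted order lemmas
-- use the LinearOrder-derived one: the comparators decide the same (defeq) relation
lemma sorted_bridge (xs : List (List Int)) :
    @PySem.List.sorted (List Int) (List Int) List.instLT (fun a b => a.decidableLT b) xs (fun x => x) false
      = @PySem.List.sorted (List Int) (List Int)
          (@Preorder.toLT _ (@PartialOrder.toPreorder _ (@LinearOrder.toPartialOrder _ List.instLinearOrder)))
          (@LinearOrder.toDecidableLT _ List.instLinearOrder) xs (fun x => x) false := by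
  rw [@PySem.List.sorted_eq_foldl_insertBy (List Int) (List Int) List.instLT (fun a b => a.decidableLT b),
      @PySem.List.sorted_eq_foldl_insertBy (List Int) (List Int)
        (@Preorder.toLT _ (@PartialOrder.toPreorder _ (@LinearOrder.toPartialOrder _ List.instLinearOrder)))
        (@LinearOrder.toDecidableLT _ List.instLinearOrder)]
  congr 1
  funext acc x
  congr 1
  funext a b
  rw [decide_eq_decide]

-- ===== VERDICT (by name: the statement is the Claim_ definition above) =====
-- B's body for one row, as a named function (used by the no-match lemmas)
def bbody (tex : String) (wid : Int) (ch : String)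
    (ans : List (List Int)) (row : Int) : List (List Int) :=
  ans ++ (if PySem.Int.mod row 2 == 1
      then ((((PySem.List.enumerate
                (PySem.Str.slice tex (some (row * wid)) (some ((row + 1) * wid))).toList 0).filter
              (fun cx => String.mk [cx.2] == ch)).map (·.1)).reverse).map (fun c => wid - c - 1)
      else (((PySem.List.enumerate
                (PySem.Str.slice tex (some (row * wid)) (some ((row + 1) * wid))).toList 0).filter
              (fun cx => String.mk [cx.2] == ch)).map (·.1))).map (fun c => [row, c])

lemma A_empty (tex : String) (wid : Int) (ch : String)
    (hno : ∀ c ∈ tex.toList, ¬ (String.mk [c] = ch)) : charLocation tex wid ch = [] := by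
  rw [A_eq]
  have hf : (PySem.List.enumerate tex.toList 0).filter (fun ic => String.mk [ic.2] == ch) = [] := by
    rw [List.filter_eq_nil_iff]
    intro ic hic
    rw [PySem.List.mem_enumerate_iff] at hic
    obtain ⟨k, hk, hik⟩ := hic
    simp only [hik, beq_iff_eq]
    exact hno _ (List.getElem_mem _)
  rw [hf, List.map_nil]
  rfl

lemma bbody_id (tex : String) (wid : Int) (ch : String)
    (hno : ∀ c ∈ tex.toList, ¬ (String.mk [c] = ch))
    (acc : List (List Int)) (row : Int) : bbody tex wid ch acc row = acc := by
  unfold bbody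
  have hf : (PySem.List.enumerate
        (PySem.Str.slice tex (some (row * wid)) (some ((row + 1) * wid))).toList 0).filter
      (fun cx => String.mk [cx.2] == ch) = [] := by
    rw [List.filter_eq_nil_iff]
    intro ic hic
    have h2 : ic.2 ∈ (PySem.Str.slice tex (some (row * wid)) (some ((row + 1) * wid))).toList := by
      have hm := List.mem_map_of_mem (f := fun p : Int × Char => p.2) hic
      rwa [PySem.List.map_snd_enumerate] at hm
    have h3 : ic.2 ∈ tex.toList := by
      rw [PySem.Str.toList_slice, PySem.Chars.slice_eq_listSlice] at h2
      exact PySem.List.mem_of_mem_slice tex.toList _ _ h2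
    simp only [beq_iff_eq]
    exact hno _ h3
  rw [hf]
  split <;> simp

lemma B_empty (tex : String) (wid : Int) (ch : String)
    (hno : ∀ c ∈ tex.toList, ¬ (String.mk [c] = ch)) : charLocation_alt tex wid ch = [] := by
  show (PySem.List.pyRange 0
      (PySem.Int.floordiv (PySem.Str.len tex + wid - 1) wid)).foldl (bbody tex wid ch) [] = []
  generalize PySem.List.pyRange 0 (PySem.Int.floordiv (PySem.Str.len tex + wid - 1) wid) = l
  induction l with
  | nil => rfl
  | cons x xs ih => rw [List.foldl_cons, bbody_id tex wid ch hno]; exact ih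

-- ===== VERDICT (moved below; see bottom) =====
theorem charLocation_spec : Claim_equal_charLocation := by
  intro tex wid ch _ hpre
  unfold Pre_charLocation at hpre
  unfold Spec_charLocation
  rcases hpre with hw | ⟨-, hnomem⟩
  case inr =>
    have hno : ∀ c ∈ tex.toList, ¬ (String.mk [c] = ch) :=
      fun c hc he => hnomem (List.mem_map.mpr ⟨c, hc, he⟩)
    rw [A_empty tex wid ch hno, B_empty tex wid ch hno]
  rw [A_eq, B_eq tex wid hw ch]
  refine Eq.trans (sorted_bridge _) ?_
  have hcov : tex.toList.length
      ≤ (PySem.Int.floordiv ((tex.toList.length : Int) + wid - 1) wid).toNat * wid.toNat := by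
    have hR0 : 0 ≤ PySem.Int.floordiv ((tex.toList.length : Int) + wid - 1) wid := by
      rw [PySem.Int.floordiv_eq_ediv_of_pos hw]
      apply Int.ediv_nonneg <;> omega
    have hruv : (tex.toList.length : Int)
        ≤ PySem.Int.floordiv ((tex.toList.length : Int) + wid - 1) wid * wid := by
      rw [PySem.Int.floordiv_eq_ediv_of_pos hw]
      have h1 := Int.ediv_add_emod ((tex.toList.length : Int) + wid - 1) wid
      have h2 := Int.emod_nonneg ((tex.toList.length : Int) + wid - 1) (by omega : wid ≠ 0)
      have h3 := Int.emod_lt_of_pos ((tex.toList.length : Int) + wid - 1) hw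
      have hc := mul_comm (((tex.toList.length : Int) + wid - 1) / wid) wid
      linarith
    have hcn : (((PySem.Int.floordiv ((tex.toList.length : Int) + wid - 1) wid).toNat * wid.toNat : Nat) : Int)
        = PySem.Int.floordiv ((tex.toList.length : Int) + wid - 1) wid * wid := by
      push_cast
      rw [Int.toNat_of_nonneg hR0, Int.toNat_of_nonneg (le_of_lt hw)]
    have hfin : (tex.toList.length : Int)
        ≤ (((PySem.Int.floordiv ((tex.toList.length : Int) + wid - 1) wid).toNat * wid.toNat : Nat) : Int) := by
      rw [hcn]; exact hruv
    exact_mod_cast hfin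
  have h := snake_perm wid hw ch
    (PySem.Int.floordiv ((tex.toList.length : Int) + wid - 1) wid).toNat tex.toList 0 (le_refl 0) hcov
  rw [zero_mul] at h
  exact PySem.List.sorted_eq_of_perm_of_pairwise_lt _ _ _ h
    ((snake_pairwise _ _ _ _ _).imp fun {a b} hlt => hlt)
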